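-- pv_equiv track=rewrite | github.com/IAmAnalyst/Level_0_Coding_Challenges | Task0.9.py | Vowels_in_this_string
-- ===== SOURCE A (Python) =====
-- def Vowels_in_this_string(s):
--     s=s.lower()
--     v="aeiou"
--     vowels=" "
--
--     for i in s:
--         for l in range(len(v)):
--             if((i==v[l]) & ~(i in vowels )):
--                 vowels+=i+","
--     return "Vowels :"+ vowels
-- ===== SOURCE B (Python) =====
-- def Vowels_in_this_string(s):
--     t = s.lower()
--     hits = sorted(((t.find(c), c) for c in "aeiou" if c in t), key=lambda p: p[0])
--     return "Vowels : " + "".join(c + "," for _, c in hits)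
-- ===== Notes on version B (the rewrite author's own statement) =====
-- stated objective: alternative
-- what changed: Instead of A's per-character Python-level scan over s with a 5-iteration inner vowel loop and dedup by membership in the growing accumulator string, B scans the fixed 5-vowel alphabet, uses str.find to get each present vowel's first-occurrence index, sorts the at most five (index, vowel) pairs, and joins; first-appearance order is recovered by sorting rather than by scan order.
import Mathlib
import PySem

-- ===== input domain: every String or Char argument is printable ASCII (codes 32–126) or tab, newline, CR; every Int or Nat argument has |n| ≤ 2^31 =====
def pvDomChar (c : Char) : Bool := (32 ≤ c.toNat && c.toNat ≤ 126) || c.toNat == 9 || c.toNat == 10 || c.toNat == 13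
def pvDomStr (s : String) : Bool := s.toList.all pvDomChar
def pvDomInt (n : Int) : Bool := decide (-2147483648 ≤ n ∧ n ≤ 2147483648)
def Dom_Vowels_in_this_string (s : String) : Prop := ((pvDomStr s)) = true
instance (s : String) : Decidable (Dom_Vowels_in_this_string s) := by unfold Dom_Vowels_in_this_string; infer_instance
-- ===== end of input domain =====

-- B replaces A's per-character scan with accumulator-membership dedup by a per-vowel
-- str.find of each vowel's first occurrence, then a sort of the (index, vowel) pairs
-- (objective: alternative).

-- ===== PORT A =====
-- literal port of A: lower the string, then for each character try all five
-- vowel positions, appending "<c>," when it matches and is not yet in the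
-- accumulator string (Python's `(i==v[l]) & ~(i in vowels)` is truthy exactly
-- when i==v[l] and i not in vowels: True & ~False = 1 & -1 = 1 is truthy,
-- True & ~True = 1 & -2 = 0 is falsy, False & _ = 0); `i in vowels` is a
-- one-character substring test, ported as PySem.Chars.isIn [i] vowels.
def Vowels_in_this_string (s : String) : String :=
  let sl : List Char := PySem.Chars.lower s.toList
  let v : List Char := "aeiou".toList
  let vowels : List Char := [' ']
  let vowels := sl.foldl (fun vowels i =>
    (PySem.List.pyRange 0 (v.length : Int) 1).foldl (fun vowels l =>
      if (i == PySem.List.pyGetD v l ' ') && !(PySem.Chars.isIn [i] vowels) then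
        vowels ++ [i, ',']
      else vowels) vowels) vowels
  String.ofList ("Vowels :".toList ++ vowels)

-- ===== PORT B =====
-- port of Source B: for each of the five vowels present in t = s.lower() (the
-- generator `(t.find(c), c) for c in "aeiou" if c in t` is the filter + map),
-- pair it with its first-occurrence index t.find(c), sort by that index
-- (key=lambda p: p[0]), then join each vowel with a trailing comma.
def Vowels_in_this_string_alt (s : String) : String :=
  let t : List Char := PySem.Chars.lower s.toList
  let hits := PySem.List.sorted
      ((("aeiou".toList).filter (fun c => PySem.Chars.isIn [c] t)).map
        (fun c => (PySem.Chars.find t [c], c)))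
      (fun p => p.1) false
  String.ofList ("Vowels : ".toList ++ hits.flatMap (fun p => [p.2, ',']))

-- ===== PRECONDITION & SPEC =====
def Spec_Vowels_in_this_string (s : String) (out : String) : Prop := out = Vowels_in_this_string_alt s
instance (s : String) (out : String) : Decidable (Spec_Vowels_in_this_string s out) := by unfold Spec_Vowels_in_this_string; infer_instance

-- ===== CLAIM (what is proved, stated in full; the proofs are below) =====
def Claim_equal_Vowels_in_this_string : Prop := ∀ (s : String), Dom_Vowels_in_this_string s → Spec_Vowels_in_this_string s (Vowels_in_this_string s)

-- ===== LEMMAS AND PROOFS =====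

-- `sub in s` for a one-character sub is element membership
theorem pvIsIn_single (c : Char) (s : List Char) : PySem.Chars.isIn [c] s = s.contains c := by
  by_cases h : c ∈ s
  · have h1 : PySem.Chars.isIn [c] s = true :=
      (PySem.Chars.isIn_iff_infix _ _).mpr ((List.singleton_infix_iff c s).mpr h)
    simp [h1, h]
  · have h1 : PySem.Chars.isIn [c] s = false :=
      (PySem.Chars.isIn_eq_false_iff _ _).mpr (fun hinf => h ((List.singleton_infix_iff c s).mp hinf))
    simp [h1, h]

def pvVowels : List Char := ['a', 'e', 'i', 'o', 'u']

def pvP (c : Char) : Bool := pvVowels.contains c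

-- ---------- A-side: reduce A's nested loops to dedup (filter pvP t) ----------

-- A's inner loop over the five vowel positions, in closed form
theorem pvInner_eq (i : Char) (acc : List Char) :
    (PySem.List.pyRange 0 (("aeiou".toList).length : Int) 1).foldl (fun vowels l =>
      if (i == PySem.List.pyGetD ("aeiou".toList) l ' ') && !(PySem.Chars.isIn [i] vowels) then
        vowels ++ [i, ',']
      else vowels) acc
    = if pvVowels.contains i && !acc.contains i then acc ++ [i, ','] else acc := by
  have hr : PySem.List.pyRange 0 (("aeiou".toList).length : Int) 1 = [0, 1, 2, 3, 4] := by decide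
  rw [hr]
  simp only [List.foldl, pvIsIn_single]
  by_cases h1 : i = 'a' <;> by_cases h2 : i = 'e' <;> by_cases h3 : i = 'i' <;>
    by_cases h4 : i = 'o' <;> by_cases h5 : i = 'u' <;>
    subst_vars <;>
    simp_all [PySem.List.pyGetD, PySem.List.pyGet?, PySem.List.pyIdx?, pvVowels,
      List.contains_eq_mem]

-- proof-side description of A's accumulator growth
def pvCollect : List Char → List Char → List Char
  | [], _ => []
  | x :: l, acc =>
      if pvVowels.contains x && !acc.contains x then
        x :: ',' :: pvCollect l (acc ++ [x, ','])
      else pvCollect l acc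

theorem pvOuter_simple (l : List Char) (acc : List Char) :
    l.foldl (fun vowels i =>
      if pvVowels.contains i && !vowels.contains i then vowels ++ [i, ','] else vowels) acc
    = acc ++ pvCollect l acc := by
  induction l generalizing acc with
  | nil => simp [pvCollect]
  | cons x l ih =>
      simp only [List.foldl_cons, pvCollect]
      by_cases h : (pvVowels.contains x && !acc.contains x) = true
      · rw [if_pos h, if_pos h, ih, List.append_assoc]
        rfl
      · rw [if_neg h, if_neg h, ih]

theorem pvOuter_eq (l : List Char) (acc : List Char) :
    l.foldl (fun vowels i =>
      (PySem.List.pyRange 0 (("aeiou".toList).length : Int) 1).foldl (fun vowels l =>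
        if (i == PySem.List.pyGetD ("aeiou".toList) l ' ') && !(PySem.Chars.isIn [i] vowels) then
          vowels ++ [i, ',']
        else vowels) vowels) acc
    = acc ++ pvCollect l acc := by
  have hf : (fun (vowels : List Char) (i : Char) =>
      (PySem.List.pyRange 0 (("aeiou".toList).length : Int) 1).foldl (fun vowels l =>
        if (i == PySem.List.pyGetD ("aeiou".toList) l ' ') && !(PySem.Chars.isIn [i] vowels) then
          vowels ++ [i, ',']
        else vowels) vowels)
      = (fun (vowels : List Char) (i : Char) =>
          if pvVowels.contains i && !vowels.contains i then vowels ++ [i, ','] else vowels) := by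
    funext vowels i
    exact pvInner_eq i vowels
  rw [hf, pvOuter_simple]

theorem pvOfList_filter (p : Char → Bool) (xs : List Char) :
    PySem.Set.ofList (xs.filter p) = (PySem.Set.ofList xs).filter p := by
  induction xs with
  | nil => rfl
  | cons x xs ih =>
      cases hpx : p x with
      | true =>
          simp [hpx, PySem.Set.ofList_cons, ih, PySem.Set.discard,
            List.filter_filter, Bool.and_comm]
      | false =>
          simp only [List.filter_cons, hpx, PySem.Set.ofList_cons, ih, PySem.Set.discard,
            List.filter_filter, Bool.false_eq_true, if_false]
          refine List.filter_congr ?_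
          intro c _
          by_cases hcx : c = x
          · subst hcx; simp [hpx]
          · simp [hcx]

-- a vowel is never ' ' , ',' : membership in the accumulator list acc ++ [x, ',']
theorem pvFilter_step (l : List Char) (acc : List Char) (x : Char) :
    l.filter (fun c => pvVowels.contains c && !(acc ++ [x, ',']).contains c)
    = (l.filter (fun c => pvVowels.contains c && !acc.contains c)).filter (fun c => c != x) := by
  rw [List.filter_filter]
  refine List.filter_congr ?_
  intro c _
  by_cases hv : pvVowels.contains c
  · have hcomma : c ≠ ',' := by
      revert hv; simp [pvVowels, List.contains_eq_mem]
      rintro (rfl | rfl | rfl | rfl | rfl) <;> decide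
    by_cases hcx : c = x
    · subst hcx; simp [hcomma]
    · simp [hcomma, hcx, Bool.and_comm]
  · have hv' : decide (c ∈ pvVowels) = false := by
      simp only [List.contains_eq_mem] at hv; simp [hv]
    simp [hv']

theorem pvCollect_eq (l : List Char) (acc : List Char) :
    pvCollect l acc
    = (PySem.List.dedup (l.filter (fun c => pvVowels.contains c && !acc.contains c))).flatMap
        (fun c => [c, ',']) := by
  induction l generalizing acc with
  | nil => simp [pvCollect]
  | cons x l ih =>
      by_cases h : (pvVowels.contains x && !acc.contains x) = true
      · simp only [pvCollect, List.filter_cons, h, if_true, ih, PySem.List.dedup_eq_ofList,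
          PySem.Set.ofList_cons]
        rw [pvFilter_step, pvOfList_filter]
        rfl
      · simp only [pvCollect, List.filter_cons, Bool.not_eq_true] at h ⊢
        simp only [h, Bool.false_eq_true, if_false, ih]

theorem pvStart_filter (l : List Char) :
    l.filter (fun c => pvVowels.contains c && !([' '] : List Char).contains c)
    = l.filter pvP := by
  refine List.filter_congr ?_
  intro c _
  unfold pvP
  cases hm : pvVowels.contains c with
  | false => simp
  | true =>
      have hsp : ([' '] : List Char).contains c = false := by
        revert hm; simp [pvVowels, List.contains_eq_mem]
        rintro (rfl | rfl | rfl | rfl | rfl) <;> decide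
      simp
      simpa using hsp

-- A, in closed form
theorem pvA_eq (s : String) :
    Vowels_in_this_string s
    = String.ofList ("Vowels : ".toList ++
        (PySem.List.dedup ((PySem.Chars.lower s.toList).filter pvP)).flatMap
          (fun c => [c, ','])) := by
  unfold Vowels_in_this_string
  simp only [pvOuter_eq, pvCollect_eq, pvStart_filter]
  have : ("Vowels :".toList ++ ([' '] : List Char) = "Vowels : ".toList) := by decide
  rw [← List.append_assoc, this]

-- ---------- B-side: the sort by first index recovers first-appearance order ----------

-- [c] is a prefix of l iff l starts with c
theorem pvPrefix_single (c : Char) (l : List Char) : [c] <+: l ↔ l.head? = some c := by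
  cases l with
  | nil => simp
  | cons a l => simp [List.cons_prefix_cons, eq_comm]

-- idxOf really points at an occurrence …
theorem pvIdxOf_get (c : Char) (t : List Char) (h : c ∈ t) : t[t.idxOf c]? = some c := by
  induction t with
  | nil => cases h
  | cons x r ih =>
      by_cases hcx : c = x
      · subst hcx; simp
      · have : c ∈ r := by
          cases h with
          | head => exact absurd rfl hcx
          | tail _ h => exact h
        have hxc : (x == c) = false := beq_eq_false_iff_ne.mpr (Ne.symm hcx)
        simp [List.idxOf_cons, hxc, ih this]

-- … and is minimal
theorem pvIdxOf_min (c : Char) (t : List Char) (i : Nat) (h : t[i]? = some c) :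
    t.idxOf c ≤ i := by
  induction t generalizing i with
  | nil => simp at h
  | cons x r ih =>
      by_cases hcx : c = x
      · subst hcx; simp
      · cases i with
        | zero => simp at h; exact absurd h.symm hcx
        | succ i =>
            simp only [List.getElem?_cons_succ] at h
            have hxc : (x == c) = false := beq_eq_false_iff_ne.mpr (Ne.symm hcx)
            simpa [List.idxOf_cons, hxc] using Nat.succ_le_succ (ih i h)

-- a single-character find is the index of the first occurrence
theorem pvFind_single (t : List Char) (c : Char) (h : c ∈ t) :
    PySem.Chars.find t [c] = (t.idxOf c : Int) := by
  have hinf : [c] <:+: t := (List.singleton_infix_iff c t).mpr h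
  have hnn : 0 ≤ PySem.Chars.find t [c] := (PySem.Chars.find_nonneg_iff _ _).mpr hinf
  obtain ⟨hpre, hmin⟩ := PySem.Chars.find_spec (s := t) (sub := [c]) hnn
  set k := (PySem.Chars.find t [c]).toNat with hk
  have hkg : t[k]? = some c := by
    have := (pvPrefix_single c (t.drop k)).mp hpre
    simpa [List.head?_drop] using this
  have h1 : t.idxOf c ≤ k := pvIdxOf_min c t k hkg
  have h2 : k ≤ t.idxOf c := by
    by_contra hlt
    push Not at hlt
    exact hmin _ hlt ((pvPrefix_single c _).mpr (by simpa [List.head?_drop] using pvIdxOf_get c t h))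
  have : k = t.idxOf c := Nat.le_antisymm h2 h1
  rw [← this, hk, Int.toNat_of_nonneg hnn]

-- elements of dedup (filter pvP t) are vowels occurring in t
theorem pvMem_dedup_filter (t : List Char) (a : Char)
    (h : a ∈ PySem.List.dedup (t.filter pvP)) : a ∈ t ∧ pvP a = true := by
  rw [PySem.List.mem_dedup, List.mem_filter] at h
  exact h

-- first-appearance dedup is strictly increasing in the index of first occurrence
theorem pvPairwiseIdx (t : List Char) :
    (PySem.List.dedup (t.filter pvP)).Pairwise (fun a b => t.idxOf a < t.idxOf b) := by
  induction t with
  | nil => simp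
  | cons x r ih =>
      by_cases hx : pvP x = true
      · rw [List.filter_cons, if_pos hx, PySem.List.dedup_eq_ofList, PySem.Set.ofList_cons]
        refine List.Pairwise.cons ?_ ?_
        · intro b hb
          have hbs : b ∈ PySem.Set.ofList (r.filter pvP) ∧ b ≠ x :=
            (PySem.Set.mem_discard _ _ _).mp hb
          have hxb : (x == b) = false := beq_eq_false_iff_ne.mpr (Ne.symm hbs.2)
          simp [List.idxOf_cons, hxb]
        · have hsub : List.Sublist
              (PySem.Set.discard (PySem.Set.ofList (r.filter pvP)) x)
              (PySem.Set.ofList (r.filter pvP)) := by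
            simp only [PySem.Set.discard]
            exact List.filter_sublist
          have hpw : (PySem.Set.discard (PySem.Set.ofList (r.filter pvP)) x).Pairwise
              (fun a b => r.idxOf a < r.idxOf b) := by
            have := ih
            rw [PySem.List.dedup_eq_ofList] at this
            exact this.sublist hsub
          refine hpw.imp_of_mem (fun {a b} ha hb hab => ?_)
          have hax : (x == a) = false :=
            beq_eq_false_iff_ne.mpr (Ne.symm ((PySem.Set.mem_discard _ _ _).mp ha).2)
          have hbx : (x == b) = false :=
            beq_eq_false_iff_ne.mpr (Ne.symm ((PySem.Set.mem_discard _ _ _).mp hb).2)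
          simpa [List.idxOf_cons, hax, hbx] using Nat.succ_lt_succ hab
      · rw [List.filter_cons, if_neg hx]
        refine ih.imp_of_mem (fun {a b} ha hb hab => ?_)
        have hax : (x == a) = false := beq_eq_false_iff_ne.mpr
          (Ne.symm fun he => hx (he ▸ (pvMem_dedup_filter r a ha).2))
        have hbx : (x == b) = false := beq_eq_false_iff_ne.mpr
          (Ne.symm fun he => hx (he ▸ (pvMem_dedup_filter r b hb).2))
        simpa [List.idxOf_cons, hax, hbx] using Nat.succ_lt_succ hab

-- the same set of vowels, as A collects it and as B enumerates it
theorem pvPermAeiou (t : List Char) :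
    (PySem.List.dedup (t.filter pvP)).Perm
      (pvVowels.filter (fun c => t.contains c)) := by
  rw [List.perm_ext_iff_of_nodup (PySem.List.nodup_dedup _)
    ((by decide : pvVowels.Nodup).filter (fun c => t.contains c))]
  intro a
  simp [List.mem_filter, pvP, List.contains_eq_mem, and_comm]

-- sorting the (first index, vowel) pairs by index names first-appearance order
theorem pvSorted_eq (t : List Char) :
    PySem.List.sorted
      ((pvVowels.filter (fun c => PySem.Chars.isIn [c] t)).map
        (fun c => (PySem.Chars.find t [c], c)))
      (fun p => p.1) false
    = (PySem.List.dedup (t.filter pvP)).map (fun c => (PySem.Chars.find t [c], c)) := by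
  have hfil : pvVowels.filter (fun c => PySem.Chars.isIn [c] t)
      = pvVowels.filter (fun c => t.contains c) := by
    refine List.filter_congr ?_
    intro c _
    exact pvIsIn_single c t
  rw [hfil]
  apply PySem.List.sorted_eq_of_perm_of_pairwise_lt
  · exact (pvPermAeiou t).map _
  · rw [List.pairwise_map]
    refine (pvPairwiseIdx t).imp_of_mem (fun {a b} ha hb hab => ?_)
    have ha' := pvMem_dedup_filter t a ha
    have hb' := pvMem_dedup_filter t b hb
    simp only [pvFind_single t a ha'.1, pvFind_single t b hb'.1]
    exact_mod_cast hab

-- B, in closed form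
theorem pvB_eq (s : String) :
    Vowels_in_this_string_alt s
    = String.ofList ("Vowels : ".toList ++
        (PySem.List.dedup ((PySem.Chars.lower s.toList).filter pvP)).flatMap
          (fun c => [c, ','])) := by
  have hv : "aeiou".toList = pvVowels := by decide
  show String.ofList ("Vowels : ".toList ++
      (PySem.List.sorted
        ((("aeiou".toList).filter
            (fun c => PySem.Chars.isIn [c] (PySem.Chars.lower s.toList))).map
          (fun c => (PySem.Chars.find (PySem.Chars.lower s.toList) [c], c)))
        (fun p => p.1) false).flatMap (fun p => [p.2, ','])) = _
  rw [hv, pvSorted_eq, List.flatMap_map]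

-- ===== VERDICT (by name: the statement is the Claim_ definition above) =====
theorem Vowels_in_this_string_spec : Claim_equal_Vowels_in_this_string := by
  intro s _
  show Vowels_in_this_string s = Vowels_in_this_string_alt s
  rw [pvA_eq, pvB_eq]
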